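-- pv_equiv track=rewrite | github.com/shantanusharma/headroom | headroom/transforms/adaptive_sizer.py | compute_unique_bigram_curve
-- ===== SOURCE A (Python) =====
-- from collections.abc import Sequence
--
-- def compute_unique_bigram_curve(items: Sequence[str]) -> list[int]:
--     """Build cumulative unique bigram coverage curve.
--
--     For each item (in order), extracts word-level bigrams, adds them to a
--     running set, and records the total unique count.
--
--     Args:
--         items: Sequence of string items in importance order.
--
--     Returns:
--         List where curve[k] = number of unique bigrams after seeing items[0:k+1].
--     """
--     seen_bigrams: set[tuple[str, str]] = set()
--     curve: list[int] = []
--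
--     for item in items:
--         words = item.lower().split()
--         if len(words) < 2:
--             # For single-word items, use the word itself as a "unigram bigram"
--             seen_bigrams.add((words[0] if words else "", ""))
--         else:
--             for j in range(len(words) - 1):
--                 seen_bigrams.add((words[j], words[j + 1]))
--         curve.append(len(seen_bigrams))
--
--     return curve
-- ===== SOURCE B (Python) =====
-- def compute_unique_bigram_curve(items):
--     """First-occurrence index pass + counts array + prefix sum (same result as the incremental-set version)."""
--     n = len(items)
--     first_seen = {}
--     for i, item in enumerate(items):
--         words = item.lower().split()
--         if len(words) < 2:
--             bigrams = [(words[0] if words else "", "")]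
--         else:
--             bigrams = list(zip(words, words[1:]))
--         for bg in bigrams:
--             if bg not in first_seen:
--                 first_seen[bg] = i
--     counts = [0] * n
--     for v in first_seen.values():
--         counts[v] += 1
--     curve = []
--     running = 0
--     for c in counts:
--         running += c
--         curve.append(running)
--     return curve
-- ===== Notes on version B (the rewrite author's own statement) =====
-- stated objective: alternative
-- what changed: Replaces the running-set accumulation with a first-occurrence-index pass (dict bigram -> earliest item index), a per-index counts array, and a final prefix sum over counts.
import Mathlib
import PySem

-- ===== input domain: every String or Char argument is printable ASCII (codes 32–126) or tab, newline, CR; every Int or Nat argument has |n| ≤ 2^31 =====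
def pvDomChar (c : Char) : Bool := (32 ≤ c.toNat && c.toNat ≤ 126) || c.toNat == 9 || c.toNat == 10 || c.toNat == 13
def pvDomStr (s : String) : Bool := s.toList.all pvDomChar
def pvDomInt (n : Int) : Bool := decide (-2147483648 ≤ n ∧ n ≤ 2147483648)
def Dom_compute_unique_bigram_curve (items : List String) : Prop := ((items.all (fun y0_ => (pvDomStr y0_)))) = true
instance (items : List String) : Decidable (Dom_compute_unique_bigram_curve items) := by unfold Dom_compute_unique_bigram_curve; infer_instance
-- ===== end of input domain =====

-- B replaces A's running-set accumulation by a first-occurrence-index dict, a counts array and a prefix sum (alternative decomposition, same result).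

-- ===== PORT A =====
-- literal port of A: running set of bigrams, append its size after each item
def compute_unique_bigram_curve (items : List String) : List Int :=
  (items.foldl (fun (st : PySem.Set (String × String) × List Int) item =>
      let words := PySem.Str.split₀ (PySem.Str.lower item)
      let s :=
        if words.length < 2 then
          -- words[0] if words else ""
          PySem.Set.add st.1 (words.headD "", "")
        else
          -- for j in range(len(words) - 1): seen.add((words[j], words[j+1]))
          (PySem.List.pyRange 0 ((words.length : Int) - 1) 1).foldl
            (fun s j => PySem.Set.add s (PySem.List.pyGetD words j "", PySem.List.pyGetD words (j + 1) ""))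
            st.1
      (s, st.2 ++ [((s.length : Int))]))
    (PySem.Set.empty, [])).2

-- ===== PORT B =====
-- B helper: the item's bigram list (words zipped with their tails; sentinel cases as in Source B)
def pvBigrams (item : String) : List (String × String) :=
  let words := PySem.Str.split₀ (PySem.Str.lower item)
  if words.length < 2 then [(words.headD "", "")]
  else words.zip (words.drop 1)

def compute_unique_bigram_curve_alt (items : List String) : List Int :=
  let fs : PySem.Dict (String × String) Int :=
    (PySem.List.enumerate items 0).foldl
      (fun d p => (pvBigrams p.2).foldl
        (fun d bg => if d.contains bg then d else d.insert bg p.1) d)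
      PySem.Dict.empty
  -- counts[v] += 1 : v is always in range 0 ≤ v < len(items), so List.set is exact here
  let counts : List Int :=
    fs.values.foldl (fun c v => c.set v.toNat (c.getD v.toNat 0 + 1))
      (List.replicate items.length (0 : Int))
  (counts.foldl (fun (st : Int × List Int) c => (st.1 + c, st.2 ++ [st.1 + c])) (0, [])).2

-- ===== PRECONDITION & SPEC =====
def Spec_compute_unique_bigram_curve (items : List String) (out : List Int) : Prop := out = compute_unique_bigram_curve_alt items
instance (items : List String) (out : List Int) : Decidable (Spec_compute_unique_bigram_curve items out) := by unfold Spec_compute_unique_bigram_curve; infer_instance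

-- ===== CLAIM (what is proved, stated in full; the proofs are below) =====
def Claim_equal_compute_unique_bigram_curve : Prop := ∀ (items : List String), Dom_compute_unique_bigram_curve items → Spec_compute_unique_bigram_curve items (compute_unique_bigram_curve items)

-- ===== LEMMAS AND PROOFS =====

-- the common reference value: number of distinct bigrams in a prefix
def pvCard (items : List String) (m : Nat) : Int :=
  ((PySem.Set.ofList ((items.take m).flatMap pvBigrams)).length : Int)

-- B's dict-building step for one item (bigrams bs get first-seen index i)
def pvInner (i : Int) (bs : List (String × String)) (d : PySem.Dict (String × String) Int) :
    PySem.Dict (String × String) Int :=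
  bs.foldl (fun d bg => if d.contains bg then d else d.insert bg i) d

def pvBuild (i : Int) (l : List String) (d : PySem.Dict (String × String) Int) :
    PySem.Dict (String × String) Int :=
  (PySem.List.enumerate l i).foldl (fun d p => pvInner p.1 (pvBigrams p.2) d) d

-- A's inner range loop enumerates exactly the zipped bigram list
theorem pv_zip_eq_map_range (ws : List String) (h : ¬ ws.length < 2) :
    ws.zip (ws.drop 1) =
      (PySem.List.pyRange 0 ((ws.length : Int) - 1) 1).map
        (fun j => (PySem.List.pyGetD ws j "", PySem.List.pyGetD ws (j + 1) "")) := by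
  rw [PySem.List.pyRange_one, List.map_map]
  apply List.ext_getElem
  · simp
  · intro i h1 h2
    have hi : i < ws.length - 1 := by simpa using h1
    have e0 : ((0 : Int) + (i : Nat)) = ((i : Nat) : Int) := by omega
    have e1 : ((i : Nat) : Int) + 1 = (((i + 1 : Nat)) : Int) := by push_cast; ring
    simp only [List.getElem_zip, List.getElem_map, List.getElem_range, Function.comp_apply,
      e0, e1, PySem.List.pyGetD_natCast, Prod.mk.injEq]
    refine ⟨?_, ?_⟩
    · rw [List.getD_eq_getElem _ _ (by omega)]
    · rw [List.getD_eq_getElem _ _ (by omega), List.getElem_drop]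
      simp [Nat.add_comm]

theorem pv_stepA (s : PySem.Set (String × String)) (item : String) :
    (if (PySem.Str.split₀ (PySem.Str.lower item)).length < 2 then
       PySem.Set.add s ((PySem.Str.split₀ (PySem.Str.lower item)).headD "", "")
     else
       (PySem.List.pyRange 0 (((PySem.Str.split₀ (PySem.Str.lower item)).length : Int) - 1) 1).foldl
         (fun s j => PySem.Set.add s (PySem.List.pyGetD (PySem.Str.split₀ (PySem.Str.lower item)) j "",
           PySem.List.pyGetD (PySem.Str.split₀ (PySem.Str.lower item)) (j + 1) ""))
         s)
    = PySem.Set.update s (pvBigrams item) := by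
  simp only [pvBigrams]
  by_cases h : (PySem.Str.split₀ (PySem.Str.lower item)).length < 2
  · rw [if_pos h, if_pos h, PySem.Set.update_cons, PySem.Set.update_nil]
  · rw [if_neg h, if_neg h, pv_zip_eq_map_range _ h, PySem.Set.update_map_eq_foldl_add]

-- A's whole fold, with generalized set and accumulator
theorem pv_A_fold (l : List String) (s : PySem.Set (String × String)) (acc : List Int) :
    (l.foldl (fun (st : PySem.Set (String × String) × List Int) item =>
        let words := PySem.Str.split₀ (PySem.Str.lower item)
        let s :=
          if words.length < 2 then
            PySem.Set.add st.1 (words.headD "", "")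
          else
            (PySem.List.pyRange 0 ((words.length : Int) - 1) 1).foldl
              (fun s j => PySem.Set.add s (PySem.List.pyGetD words j "", PySem.List.pyGetD words (j + 1) ""))
              st.1
        (s, st.2 ++ [((s.length : Int))])) (s, acc)).2
    = acc ++ (List.range l.length).map
        (fun k => ((PySem.Set.update s ((l.take (k + 1)).flatMap pvBigrams)).length : Int)) := by
  induction l generalizing s acc with
  | nil =>
    rw [List.foldl_nil, List.length_nil, List.range_zero, List.map_nil, List.append_nil]
  | cons it rest ih =>
    rw [List.foldl_cons]
    dsimp only
    rw [pv_stepA s it, ih]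
    simp only [List.length_cons, List.range_succ_eq_map, List.map_cons, List.map_map,
      List.append_assoc, List.singleton_append, Function.comp_def,
      Nat.succ_eq_add_one, zero_add, List.take_succ_cons, List.take_zero, List.flatMap_cons,
      List.flatMap_nil, List.append_nil, PySem.Set.update_append, PySem.Set.update_nil]

-- pvInner: keys grow exactly like Set.update
theorem pv_inner_keys (bs : List (String × String)) (i : Int)
    (d : PySem.Dict (String × String) Int) :
    (pvInner i bs d).keys = PySem.Set.update d.keys bs := by
  induction bs generalizing d with
  | nil => simp [pvInner, PySem.Set.update_nil]
  | cons bg t ih =>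
    simp only [pvInner, List.foldl_cons] at *
    rw [PySem.Set.update_cons]
    by_cases h : d.contains bg
    · rw [if_pos h, ih, PySem.Set.add_of_mem ((PySem.Dict.contains_iff_mem_keys d bg).mp h)]
    · rw [if_neg h, ih, PySem.Dict.keys_insert_of_not_contains d i (by simpa using h),
        PySem.Set.add_of_not_mem (fun hm => h ((PySem.Dict.contains_iff_mem_keys d bg).mpr hm))]

theorem pv_inner_nodup (bs : List (String × String)) (i : Int)
    (d : PySem.Dict (String × String) Int) (h : d.keys.Nodup) :
    (pvInner i bs d).keys.Nodup := by
  induction bs generalizing d with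
  | nil => simpa [pvInner] using h
  | cons bg t ih =>
    simp only [pvInner, List.foldl_cons] at *
    by_cases hc : d.contains bg
    · rw [if_pos hc]; exact ih d h
    · rw [if_neg hc]; exact ih _ (PySem.Dict.nodup_keys_insert d bg i h)

theorem pv_inner_values (bs : List (String × String)) (i : Int)
    (d : PySem.Dict (String × String) Int) :
    ∃ m : Nat, (pvInner i bs d).values = d.values ++ List.replicate m i := by
  induction bs generalizing d with
  | nil => exact ⟨0, by simp [pvInner]⟩
  | cons bg t ih =>
    simp only [pvInner, List.foldl_cons] at *
    by_cases hc : d.contains bg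
    · rw [if_pos hc]; exact ih d
    · rw [if_neg hc]
      obtain ⟨m, hm⟩ := ih (d.insert bg i)
      refine ⟨m + 1, ?_⟩
      have hv : (d.insert bg i).values = d.values ++ [i] := by
        simp only [PySem.Dict.values, PySem.Dict.items_insert_of_not_contains d i (by simpa using hc),
          List.map_append, List.map_cons, List.map_nil]
      rw [hm, hv, List.append_assoc]
      simp [List.replicate_succ]

theorem pv_build_values (l : List String) (i : Int)
    (d : PySem.Dict (String × String) Int) :
    ∃ vs : List Int, (pvBuild i l d).values = d.values ++ vs ∧
      ∀ v ∈ vs, i ≤ v ∧ v < i + l.length := by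
  induction l generalizing i d with
  | nil => exact ⟨[], by simp [pvBuild, PySem.List.enumerate], by simp⟩
  | cons it rest ih =>
    have hstep : pvBuild i (it :: rest) d = pvBuild (i + 1) rest (pvInner i (pvBigrams it) d) := by
      simp only [pvBuild, PySem.List.enumerate_cons, List.foldl_cons]
    obtain ⟨m, hm⟩ := pv_inner_values (pvBigrams it) i d
    obtain ⟨vs, hvs, hb⟩ := ih (i + 1) (pvInner i (pvBigrams it) d)
    refine ⟨List.replicate m i ++ vs, ?_, ?_⟩
    · rw [hstep, hvs, hm, List.append_assoc]
    · intro v hvv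
      have hlen : ((it :: rest).length : Int) = (rest.length : Int) + 1 := by
        simp only [List.length_cons]; push_cast; ring
      rcases List.mem_append.mp hvv with hvv | hvv
      · have hv : v = i := List.eq_of_mem_replicate hvv
        rw [hlen]
        omega
      · have := hb v hvv
        rw [hlen]
        omega

-- thresholds at or below the start index see nothing new
theorem pv_build_low (l : List String) (i k : Int)
    (d : PySem.Dict (String × String) Int) (hk : k ≤ i) :
    ((pvBuild i l d).values.countP (fun v => decide (v < k)))
      = d.values.countP (fun v => decide (v < k)) := by
  obtain ⟨vs, hvs, hb⟩ := pv_build_values l i d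
  rw [hvs, List.countP_append]
  have hz : vs.countP (fun v => decide (v < k)) = 0 := by
    rw [List.countP_eq_zero]
    intro v hv
    have := (hb v hv).1
    simp only [decide_eq_true_eq]
    omega
  omega

-- MAIN B lemma: entries below threshold k count the distinct bigrams of the first (k-i) items
theorem pv_build_count (l : List String) (d : PySem.Dict (String × String) Int) (i k : Int)
    (hnd : d.keys.Nodup) (hv : ∀ v ∈ d.values, v < i) (hik : i ≤ k) :
    ((pvBuild i l d).values.countP (fun v => decide (v < k)))
      = (PySem.Set.update d.keys ((l.take (k - i).toNat).flatMap pvBigrams)).length := by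
  induction l generalizing d i with
  | nil =>
    have h1 : pvBuild i [] d = d := by simp [pvBuild, PySem.List.enumerate]
    rw [h1]
    have h2 : d.values.countP (fun v => decide (v < k)) = d.values.length := by
      rw [List.countP_eq_length]
      intro v hvv
      have := hv v hvv
      simp only [decide_eq_true_eq]
      omega
    rw [h2]
    simp [PySem.Dict.values, PySem.Dict.keys, PySem.Set.update_nil]
  | cons it rest ih =>
    have hstep : pvBuild i (it :: rest) d = pvBuild (i + 1) rest (pvInner i (pvBigrams it) d) := by
      simp only [pvBuild, PySem.List.enumerate_cons, List.foldl_cons]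
    obtain ⟨m, hm⟩ := pv_inner_values (pvBigrams it) i d
    have hnd' : (pvInner i (pvBigrams it) d).keys.Nodup := pv_inner_nodup _ i d hnd
    have hv2 : ∀ v ∈ (pvInner i (pvBigrams it) d).values, v < i + 1 := by
      rw [hm]
      intro v hvv
      rcases List.mem_append.mp hvv with hvv | hvv
      · have := hv v hvv; omega
      · have := List.eq_of_mem_replicate hvv; omega
    by_cases hik1 : i + 1 ≤ k
    · rw [hstep, ih _ _ hnd' hv2 hik1, pv_inner_keys]
      have ht : (k - i).toNat = (k - (i + 1)).toNat + 1 := by omega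
      rw [ht, List.take_succ_cons, List.flatMap_cons, PySem.Set.update_append]
    · have hk : k = i := by omega
      rw [hstep, pv_build_low rest (i + 1) k _ (by omega)]
      have hrep : (List.replicate m i).countP (fun v => decide (v < k)) = 0 := by
        rw [List.countP_eq_zero]
        intro v hvv
        have := List.eq_of_mem_replicate hvv
        simp only [decide_eq_true_eq]
        omega
      have hdv : d.values.countP (fun v => decide (v < k)) = d.values.length := by
        rw [List.countP_eq_length]
        intro v hvv
        have := hv v hvv
        simp only [decide_eq_true_eq]
        omega
      have ht : (k - i).toNat = 0 := by omega
      rw [hm, List.countP_append, hrep, hdv, ht]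
      simp [PySem.Dict.values, PySem.Dict.keys, PySem.Set.update_nil]

-- counts-array fold: length preserved, pointwise a counter
theorem pv_counts_length (vs : List Int) (c : List Int) :
    (vs.foldl (fun c v => c.set v.toNat (c.getD v.toNat 0 + 1)) c).length = c.length := by
  induction vs generalizing c with
  | nil => rfl
  | cons v t ih => rw [List.foldl_cons, ih, List.length_set]

theorem pv_counts_getElemq (vs : List Int) (c : List Int) (j : Nat)
    (hv : ∀ v ∈ vs, 0 ≤ v ∧ v < (c.length : Int)) :
    getElem? (vs.foldl (fun c v => c.set v.toNat (c.getD v.toNat 0 + 1)) c) j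
      = (getElem? c j).map (· + (vs.count (j : Int) : Int)) := by
  induction vs generalizing c with
  | nil =>
    rw [List.foldl_nil, List.count_nil]
    cases h : getElem? c j <;> simp
  | cons v t ih =>
    have hv0 := hv v List.mem_cons_self
    have hv1 : ∀ w ∈ t, 0 ≤ w ∧ w < ((c.set v.toNat (c.getD v.toNat 0 + 1)).length : Int) := by
      intro w hw
      have := hv w (List.mem_cons_of_mem v hw)
      simpa using this
    rw [List.foldl_cons, ih _ hv1]
    by_cases hj : v.toNat = j
    · have hvj : v = ((j : Nat) : Int) := by omega
      have hlt : j < c.length := by omega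
      have hset : getElem? (c.set v.toNat (c.getD v.toNat 0 + 1)) j
          = some (c.getD v.toNat 0 + 1) := by
        rw [show v.toNat = j from hj]
        exact List.getElem?_set_self (by omega)
      have hc : getElem? c j = some (c.getD j 0) := by
        rw [List.getElem?_eq_getElem hlt, List.getD_eq_getElem _ _ hlt]
      have hg : c.getD v.toNat 0 = c.getD j 0 := by rw [hj]
      rw [hset, hc, hg, hvj]
      simp only [List.count_cons, Option.map_some, Option.some.injEq, beq_self_eq_true, if_true]
      push_cast
      ring
    · have hset : getElem? (c.set v.toNat (c.getD v.toNat 0 + 1)) j = getElem? c j :=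
        List.getElem?_set_ne hj
      rw [hset]
      have hne1 : v ≠ ((j : Nat) : Int) := by omega
      have hne2 : ((j : Nat) : Int) ≠ v := by omega
      simp [hne1]

theorem pv_counts_take (vs : List Int) (n m : Nat) (hm : m ≤ n)
    (hv : ∀ v ∈ vs, 0 ≤ v ∧ v < (n : Int)) :
    (vs.foldl (fun c v => c.set v.toNat (c.getD v.toNat 0 + 1)) (List.replicate n (0 : Int))).take m
      = (List.range m).map (fun (j : Nat) => ((vs.count ((j : Int)) : Nat) : Int)) := by
  have hlen : (vs.foldl (fun c v => c.set v.toNat (c.getD v.toNat 0 + 1))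
      (List.replicate n (0 : Int))).length = n := by
    rw [pv_counts_length, List.length_replicate]
  have hv' : ∀ v ∈ vs, 0 ≤ v ∧ v < ((List.replicate n (0 : Int)).length : Int) := by
    simpa using hv
  apply List.ext_getElem
  · rw [List.length_take, hlen, List.length_map, List.length_range]
    omega
  · intro j h1 h2
    have hjm : j < m := by simpa using h2
    have h3 := pv_counts_getElemq vs (List.replicate n (0 : Int)) j hv'
    rw [List.getElem?_eq_getElem (show j < (vs.foldl (fun c v => c.set v.toNat (c.getD v.toNat 0 + 1))
          (List.replicate n (0 : Int))).length by rw [hlen]; omega),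
        List.getElem?_eq_getElem (show j < (List.replicate n (0 : Int)).length by
          rw [List.length_replicate]; omega)] at h3
    simp only [Option.map_some, Option.some.injEq, List.getElem_replicate, zero_add] at h3
    rw [List.getElem_take, List.getElem_map, List.getElem_range]
    exact h3

theorem pv_countP_succ (vs : List Int) (m : Int) :
    vs.countP (fun v => decide (v < m + 1)) = vs.countP (fun v => decide (v < m)) + vs.count m := by
  induction vs with
  | nil => rfl
  | cons v t ih =>
    rw [List.countP_cons, List.countP_cons, List.count_cons, ih]
    rcases lt_trichotomy v m with h | h | h
    · have e1 : decide (v < m + 1) = true := decide_eq_true (by omega)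
      have e2 : decide (v < m) = true := decide_eq_true h
      have e3 : (v == m) = false := by rw [beq_eq_false_iff_ne]; omega
      rw [e1, e2, e3]
      simp
      omega
    · have e1 : decide (v < m + 1) = true := decide_eq_true (by omega)
      have e2 : decide (v < m) = false := decide_eq_false (by omega)
      have e3 : (v == m) = true := beq_iff_eq.mpr h
      rw [e1, e2, e3]
      simp
      omega
    · have e1 : decide (v < m + 1) = false := decide_eq_false (by omega)
      have e2 : decide (v < m) = false := decide_eq_false (by omega)
      have e3 : (v == m) = false := by rw [beq_eq_false_iff_ne]; omega
      rw [e1, e2, e3]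
      simp

theorem pv_sum_counts (vs : List Int) (m : Nat) (hv : ∀ v ∈ vs, 0 ≤ v) :
    ((List.range m).map (fun (j : Nat) => ((vs.count ((j : Int)) : Nat) : Int))).sum
      = (vs.countP (fun v => decide (v < (m : Int))) : Int) := by
  induction m with
  | zero =>
    have h0 : vs.countP (fun v => decide (v < (0 : Int))) = 0 := by
      rw [List.countP_eq_zero]
      intro v hvv
      have := hv v hvv
      simp only [decide_eq_true_eq]
      omega
    simp [h0]
  | succ m ih =>
    rw [List.range_succ, List.map_append, List.sum_append, ih]
    have hc : ((m + 1 : Nat) : Int) = ((m : Nat) : Int) + 1 := by push_cast; ring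
    rw [hc, pv_countP_succ]
    simp only [List.map_cons, List.map_nil, List.sum_cons, List.sum_nil]
    push_cast
    ring

-- the prefix-sum loop produces running totals
theorem pv_prefix_sum (cs : List Int) (a : Int) (acc : List Int) :
    (cs.foldl (fun (st : Int × List Int) c => (st.1 + c, st.2 ++ [st.1 + c])) (a, acc)).2
      = acc ++ (List.range cs.length).map (fun k => a + (cs.take (k + 1)).sum) := by
  induction cs generalizing a acc with
  | nil => simp
  | cons c t ih =>
    rw [List.foldl_cons]
    dsimp only
    rw [ih, List.length_cons, List.range_succ_eq_map, List.map_cons, List.map_map,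
      List.append_assoc, List.singleton_append]
    congr 1
    congr 1
    · simp
    · apply List.map_congr_left
      intro k _
      simp only [Function.comp_apply, Nat.succ_eq_add_one, List.take_succ_cons, List.sum_cons]
      ring

theorem pv_A_eq (items : List String) :
    compute_unique_bigram_curve items
      = (List.range items.length).map (fun k => pvCard items (k + 1)) := by
  unfold compute_unique_bigram_curve
  rw [pv_A_fold]
  simp only [List.nil_append]
  apply List.map_congr_left
  intro k _
  simp only [pvCard, PySem.Set.empty, PySem.Set.update_nil_left]

theorem pv_B_eq (items : List String) :
    compute_unique_bigram_curve_alt items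
      = (List.range items.length).map (fun k => pvCard items (k + 1)) := by
  show (((pvBuild 0 items PySem.Dict.empty).values.foldl
      (fun c v => c.set v.toNat (c.getD v.toNat 0 + 1))
      (List.replicate items.length (0 : Int))).foldl
      (fun (st : Int × List Int) c => (st.1 + c, st.2 ++ [st.1 + c])) (0, [])).2 = _
  obtain ⟨vs, hvs, hb⟩ := pv_build_values items 0 PySem.Dict.empty
  have hrange : ∀ v ∈ (pvBuild 0 items PySem.Dict.empty).values,
      0 ≤ v ∧ v < (items.length : Int) := by
    rw [hvs]
    intro v hvv
    have hv1 : v ∈ vs := by simpa [PySem.Dict.values, PySem.Dict.empty] using hvv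
    have := hb v hv1
    omega
  rw [pv_prefix_sum]
  rw [List.nil_append, pv_counts_length, List.length_replicate]
  apply List.map_congr_left
  intro k hk
  have hk' : k < items.length := List.mem_range.mp hk
  rw [zero_add, pv_counts_take _ items.length (k + 1) (by omega) hrange,
    pv_sum_counts _ (k + 1) (fun v hvv => (hrange v hvv).1)]
  have hcnt := pv_build_count items PySem.Dict.empty 0 ((k + 1 : Nat) : Int)
    (by simp [PySem.Dict.keys_empty])
    (by intro v hvv; simp [PySem.Dict.empty, PySem.Dict.values] at hvv)
    (by omega)
  have ht : (((k + 1 : Nat) : Int) - 0).toNat = k + 1 := by omega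
  rw [ht, PySem.Dict.keys_empty, PySem.Set.update_nil_left] at hcnt
  rw [hcnt]
  rfl

-- ===== VERDICT (by name: the statement is the Claim_ definition above) =====
theorem compute_unique_bigram_curve_spec : Claim_equal_compute_unique_bigram_curve := by
  intro items _
  unfold Spec_compute_unique_bigram_curve
  rw [pv_A_eq, pv_B_eq]
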